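-- pv_equiv track=rewrite | github.com/fabio-writes-code/Open-Stage-Control-Presets | orchestral_doublers/updateController.py | buttonStrings
-- ===== SOURCE A (Python) =====
-- def buttonStrings(doublings):
--     controller_elements = ''
--     horizontal, vertical = 0, 0
--     surface_elements = ''
--     host_values = ''
--     channel, cc = 0, 1
--
--     for doubling in doublings.keys():
--         trackName = doubling.replace(' ', '')
--         trackName = trackName.replace('/', '_')
--         doubling = doubling.replace('/', '-')
--
--         controller_elements += f'var {trackName} = deviceDriver.mSurface.makeButton({horizontal}, {vertical}, 1, 1)\n'
--         horizontal += 1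
--         if horizontal > 20:
--             horizontal = 0
--             vertical += 1
--         surface_elements += f'{trackName}.mSurfaceValue.mMidiBinding\n\t.setInputPort(midiInput)\n\t.bindToControlChange({channel}, {cc})\n'
--         cc += 1
--         if cc > 127:
--             cc = 1
--             channel += 1
--
--         host_values += f'page.makeCommandBinding({trackName}.mSurfaceValue, \'Process Project Logical Editor\',\'{doubling}\')\n'
--
--     pageLine = f'var page = deviceDriver.mMapping.makePage(\'page\')\n'
--
--     return pageLine+'\n'+controller_elements+'\n'+surface_elements+'\n'+host_values+'\n'
-- ===== SOURCE B (Python) =====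
-- def buttonStrings(doublings):
--     # Staged passes: materialize keys and track names once, then build each of the
--     # three sections with its own independent pass; positions come from index
--     # arithmetic instead of running wrap-around counters.
--     keys = list(doublings)
--     tracks = [k.replace(' ', '').replace('/', '_') for k in keys]
--     controller = ''.join(
--         f'var {t} = deviceDriver.mSurface.makeButton({i % 21}, {i // 21}, 1, 1)\n'
--         for i, t in enumerate(tracks))
--     surface = ''.join(
--         f'{t}.mSurfaceValue.mMidiBinding\n\t.setInputPort(midiInput)\n\t.bindToControlChange({i // 127}, {i % 127 + 1})\n'
--         for i, t in enumerate(tracks))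
--     host = ''.join(
--         f"page.makeCommandBinding({t}.mSurfaceValue, 'Process Project Logical Editor','{k.replace('/', '-')}')\n"
--         for t, k in zip(tracks, keys))
--     return ("var page = deviceDriver.mMapping.makePage('page')\n\n"
--             + controller + '\n' + surface + '\n' + host + '\n')
-- ===== Notes on version B (the rewrite author's own statement) =====
-- stated objective: alternative
-- what changed: A runs one stateful pass mutating four wrap-around counters and three growing strings; B is staged: it materializes the key and track-name lists once, then builds each of the three sections with its own independent pass (comprehension + join), deriving positions from the index by arithmetic (i % 21, i // 21, i // 127, i % 127 + 1) so no running counters or reset branches exist.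
import Mathlib
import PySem

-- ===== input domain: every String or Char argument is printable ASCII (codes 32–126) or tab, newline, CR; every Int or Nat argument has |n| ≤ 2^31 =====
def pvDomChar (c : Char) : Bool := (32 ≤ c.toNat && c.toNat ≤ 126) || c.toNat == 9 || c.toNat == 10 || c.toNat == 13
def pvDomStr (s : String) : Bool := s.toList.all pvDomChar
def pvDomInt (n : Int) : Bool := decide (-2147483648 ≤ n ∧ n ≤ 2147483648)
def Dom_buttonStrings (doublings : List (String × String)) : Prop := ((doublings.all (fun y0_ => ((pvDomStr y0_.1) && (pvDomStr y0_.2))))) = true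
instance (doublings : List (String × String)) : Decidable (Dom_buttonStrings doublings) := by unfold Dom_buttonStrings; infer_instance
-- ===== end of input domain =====

-- B replaces A's single stateful pass (four wrap-around counters, three growing strings)
-- by staged passes: track names precomputed once, then one independent pass per section
-- with positions from index arithmetic (objective: alternative).

-- ===== PORT A =====
-- loop body of A; state: (controller_elements, horizontal, vertical, surface_elements, host_values, channel, cc)
def buttonStringsStep (st : String × Int × Int × String × String × Int × Int)
    (doubling : String) : String × Int × Int × String × String × Int × Int :=
  let (ce, horizontal, vertical, se, hv, channel, cc) := st
  let trackName := PySem.Str.replace (PySem.Str.replace doubling " " "") "/" "_"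
  let doubling := PySem.Str.replace doubling "/" "-"
  let ce := ce ++ "var " ++ trackName ++ " = deviceDriver.mSurface.makeButton(" ++
    PySem.Int.toStr horizontal ++ ", " ++ PySem.Int.toStr vertical ++ ", 1, 1)\n"
  let horizontal := horizontal + 1
  let (horizontal, vertical) := if horizontal > 20 then ((0:Int), vertical + 1) else (horizontal, vertical)
  let se := se ++ trackName ++ ".mSurfaceValue.mMidiBinding\n\t.setInputPort(midiInput)\n\t.bindToControlChange(" ++
    PySem.Int.toStr channel ++ ", " ++ PySem.Int.toStr cc ++ ")\n"
  let cc := cc + 1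
  let (cc, channel) := if cc > 127 then ((1:Int), channel + 1) else (cc, channel)
  let hv := hv ++ "page.makeCommandBinding(" ++ trackName ++ ".mSurfaceValue, 'Process Project Logical Editor','" ++
    doubling ++ "')\n"
  (ce, horizontal, vertical, se, hv, channel, cc)

def buttonStrings (doublings : List (String × String)) : String :=
  let r := ((PySem.Dict.ofList doublings).keys).foldl buttonStringsStep ("", 0, 0, "", "", 0, 1)
  "var page = deviceDriver.mMapping.makePage('page')\n" ++ "\n" ++ r.1 ++ "\n" ++
    r.2.2.2.1 ++ "\n" ++ r.2.2.2.2.1 ++ "\n"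

-- ===== PORT B =====
def bTrack (k : String) : String := PySem.Str.replace (PySem.Str.replace k " " "") "/" "_"

def bCtrl (p : Int × String) : String :=
  "var " ++ p.2 ++ " = deviceDriver.mSurface.makeButton(" ++
    PySem.Int.toStr (PySem.Int.mod p.1 21) ++ ", " ++ PySem.Int.toStr (PySem.Int.floordiv p.1 21) ++ ", 1, 1)\n"

def bSurf (p : Int × String) : String :=
  p.2 ++ ".mSurfaceValue.mMidiBinding\n\t.setInputPort(midiInput)\n\t.bindToControlChange(" ++
    PySem.Int.toStr (PySem.Int.floordiv p.1 127) ++ ", " ++ PySem.Int.toStr (PySem.Int.mod p.1 127 + 1) ++ ")\n"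

def bHost (p : String × String) : String :=
  "page.makeCommandBinding(" ++ p.1 ++ ".mSurfaceValue, 'Process Project Logical Editor','" ++
    PySem.Str.replace p.2 "/" "-" ++ "')\n"

def buttonStrings_alt (doublings : List (String × String)) : String :=
  let keys := (PySem.Dict.ofList doublings).keys
  let tracks := keys.map bTrack
  let controller := PySem.Str.join "" ((PySem.List.enumerate tracks 0).map bCtrl)
  let surface := PySem.Str.join "" ((PySem.List.enumerate tracks 0).map bSurf)
  let host := PySem.Str.join "" ((tracks.zip keys).map bHost)
  "var page = deviceDriver.mMapping.makePage('page')\n\n" ++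
    controller ++ "\n" ++ surface ++ "\n" ++ host ++ "\n"

-- ===== PRECONDITION & SPEC =====
def Spec_buttonStrings (doublings : List (String × String)) (out : String) : Prop := out = buttonStrings_alt doublings
instance (doublings : List (String × String)) (out : String) : Decidable (Spec_buttonStrings doublings out) := by unfold Spec_buttonStrings; infer_instance

-- ===== CLAIM (what is proved, stated in full; the proofs are below) =====
def Claim_equal_buttonStrings : Prop := ∀ (doublings : List (String × String)), Dom_buttonStrings doublings → Spec_buttonStrings doublings (buttonStrings doublings)

-- ===== LEMMAS AND PROOFS =====
-- A-shaped per-key lines, used only for the loop invariant of A's fold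
def aCtrlLine (p : Int × String) : String := bCtrl (p.1, bTrack p.2)
def aSurfLine (p : Int × String) : String := bSurf (p.1, bTrack p.2)
def aHostLine (k : String) : String := bHost (bTrack k, k)

lemma join_empty_cons (s : String) (rest : List String) :
    PySem.Str.join "" (s :: rest) = s ++ PySem.Str.join "" rest := by
  simp only [PySem.Str.join, PySem.Chars.join, List.intercalate]
  apply String.ext
  cases rest <;> simp [String.toList_ofList]

lemma mod21 (i : Nat) : PySem.Int.mod (i : Int) 21 = ((i % 21 : Nat) : Int) := by
  rw [PySem.Int.mod_eq_emod_of_pos (by norm_num)]; omega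

lemma div21 (i : Nat) : PySem.Int.floordiv (i : Int) 21 = ((i / 21 : Nat) : Int) := by
  rw [PySem.Int.floordiv_eq_ediv_of_pos (by norm_num)]; omega

lemma mod127 (i : Nat) : PySem.Int.mod (i : Int) 127 = ((i % 127 : Nat) : Int) := by
  rw [PySem.Int.mod_eq_emod_of_pos (by norm_num)]; omega

lemma div127 (i : Nat) : PySem.Int.floordiv (i : Int) 127 = ((i / 127 : Nat) : Int) := by
  rw [PySem.Int.floordiv_eq_ediv_of_pos (by norm_num)]; omega

lemma wrap21 (i : Nat) :
    (if ((i % 21 : Nat) : Int) + 1 > 20 then ((0:Int), ((i / 21 : Nat) : Int) + 1)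
     else (((i % 21 : Nat) : Int) + 1, ((i / 21 : Nat) : Int)))
    = ((((i+1) % 21 : Nat) : Int), (((i+1) / 21 : Nat) : Int)) := by
  split_ifs with h <;> simp only [Prod.mk.injEq] <;> constructor <;> omega

lemma wrap127 (i : Nat) :
    (if ((i % 127 : Nat) : Int) + 1 + 1 > 127 then ((1:Int), ((i / 127 : Nat) : Int) + 1)
     else (((i % 127 : Nat) : Int) + 1 + 1, ((i / 127 : Nat) : Int)))
    = ((((i+1) % 127 : Nat) : Int) + 1, (((i+1) / 127 : Nat) : Int)) := by
  split_ifs with h <;> simp only [Prod.mk.injEq] <;> constructor <;> omega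

lemma step_eq (i : Nat) (ce se hv k : String) :
    buttonStringsStep
      (ce, ((i % 21 : Nat) : Int), ((i / 21 : Nat) : Int), se, hv,
        ((i / 127 : Nat) : Int), ((i % 127 : Nat) : Int) + 1) k
    = (ce ++ aCtrlLine ((i : Int), k),
       (((i+1) % 21 : Nat) : Int), (((i+1) / 21 : Nat) : Int),
       se ++ aSurfLine ((i : Int), k),
       hv ++ aHostLine k,
       (((i+1) / 127 : Nat) : Int), (((i+1) % 127 : Nat) : Int) + 1) := by
  simp only [buttonStringsStep, aCtrlLine, aSurfLine, aHostLine, bCtrl, bSurf, bHost, bTrack,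
    mod21, div21, mod127, div127, wrap21, wrap127]
  simp [String.append_assoc]

lemma fold_inv : ∀ (ks : List String) (i : Nat) (ce se hv : String),
    ks.foldl buttonStringsStep
      (ce, ((i % 21 : Nat) : Int), ((i / 21 : Nat) : Int), se, hv,
        ((i / 127 : Nat) : Int), ((i % 127 : Nat) : Int) + 1)
    = (ce ++ PySem.Str.join "" ((PySem.List.enumerate ks (i : Int)).map aCtrlLine),
       (((i + ks.length) % 21 : Nat) : Int), (((i + ks.length) / 21 : Nat) : Int),
       se ++ PySem.Str.join "" ((PySem.List.enumerate ks (i : Int)).map aSurfLine),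
       hv ++ PySem.Str.join "" (ks.map aHostLine),
       (((i + ks.length) / 127 : Nat) : Int), (((i + ks.length) % 127 : Nat) : Int) + 1) := by
  intro ks
  induction ks with
  | nil =>
    intro i ce se hv
    simp [PySem.List.enumerate_nil, PySem.Str.join, PySem.Chars.join, List.intercalate]
  | cons k ks ih =>
    intro i ce se hv
    rw [List.foldl_cons, step_eq, PySem.List.enumerate_cons]
    have hcast : (i : Int) + 1 = ((i + 1 : Nat) : Int) := by push_cast; ring
    rw [hcast, List.map_cons, List.map_cons, List.map_cons,
      join_empty_cons, join_empty_cons, join_empty_cons,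
      ih (i+1) (ce ++ aCtrlLine ((i : Int), k)) (se ++ aSurfLine ((i : Int), k)) (hv ++ aHostLine k)]
    have hlen : i + 1 + ks.length = i + (ks.length + 1) := by omega
    simp [String.append_assoc, hlen]

-- bridging: B's passes over the precomputed track list equal A-shaped per-key passes
lemma enum_map_bridge (f : Int × String → String) :
    ∀ (ks : List String) (s : Int),
    (PySem.List.enumerate (ks.map bTrack) s).map f
      = (PySem.List.enumerate ks s).map (fun p => f (p.1, bTrack p.2)) := by
  intro ks
  induction ks with
  | nil => intro s; simp [PySem.List.enumerate_nil]
  | cons k ks ih => intro s; simp [PySem.List.enumerate_cons, ih]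

lemma zip_map_bridge : ∀ (ks : List String),
    ((ks.map bTrack).zip ks).map bHost = ks.map aHostLine := by
  intro ks
  induction ks with
  | nil => simp
  | cons k ks ih => simp [aHostLine, ih]

-- ===== VERDICT (by name: the statement is the Claim_ definition above) =====
theorem buttonStrings_spec : Claim_equal_buttonStrings := by
  intro doublings _
  unfold Spec_buttonStrings
  have h := fold_inv ((PySem.Dict.ofList doublings).keys) 0 "" "" ""
  norm_num at h
  have hp : ("var page = deviceDriver.mMapping.makePage('page')\n" ++ "\n" : String)
      = "var page = deviceDriver.mMapping.makePage('page')\n\n" := by decide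
  simp only [buttonStrings, buttonStrings_alt, h, enum_map_bridge, zip_map_bridge]
  simp only [show aCtrlLine = fun p => bCtrl (p.1, bTrack p.2) from rfl,
    show aSurfLine = fun p => bSurf (p.1, bTrack p.2) from rfl]
  simp [hp]
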